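-- pv_equiv track=rewrite | github.com/hyunbin1601/algorithm | baekjoon-10844.py | dp
-- ===== SOURCE A (Python) =====
-- def dp(n):
--     dp = [[0]*10 for _ in range(n+1)]  # 처음에는 모두 0으로 초기화
--     for i in range(1, 10):
--         dp[1][i] = 1 # 10개의 칸, 첫번째 칸은 항상 0
--     for i in range(2, n+1): # 새로운 for문, 위의 것이랑 다름, 0번째도 카운트가 가능해짐
--         for j in range(10):
--             if j == 0:
--                 dp[i][j] = dp[i-1][1]
--             elif j == 9:
--                 dp[i][j] = dp[i-1][8]
--             else:
--                 dp[i][j] = dp[i-1][j-1] + dp[i-1][j+1]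
--     return dp[n]
-- ===== SOURCE B (Python) =====
-- def dp(n):
--     # Matrix exponentiation: the digit-count vector evolves by the fixed 10x10
--     # adjacency matrix M (M[i][j] = 1 iff |i-j| == 1); answer = v0 * M^(n-1).
--     M = [[1 if abs(i - j) == 1 else 0 for j in range(10)] for i in range(10)]
--
--     def mat_mul(A, B):
--         return [[sum(A[i][k] * B[k][j] for k in range(10)) for j in range(10)]
--                 for i in range(10)]
--
--     def mat_pow(A, e):
--         if e == 0:
--             return [[1 if i == j else 0 for j in range(10)] for i in range(10)]
--         h = mat_pow(A, e // 2)
--         s = mat_mul(h, h)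
--         return mat_mul(s, A) if e % 2 else s
--
--     def vec_mul(v, P):
--         return [sum(v[i] * P[i][j] for i in range(10)) for j in range(10)]
--
--     P = mat_pow(M, n - 1)
--     return vec_mul([0] + [1] * 9, P)
-- ===== Notes on version B (the rewrite author's own statement) =====
-- stated objective: faster
-- what changed: B replaces A's row-by-row DP table with binary exponentiation of the fixed 10x10 digit-adjacency matrix, applying M^(n-1) to the initial vector; O(log n) matrix multiplications instead of n DP rows.
import Mathlib
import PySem

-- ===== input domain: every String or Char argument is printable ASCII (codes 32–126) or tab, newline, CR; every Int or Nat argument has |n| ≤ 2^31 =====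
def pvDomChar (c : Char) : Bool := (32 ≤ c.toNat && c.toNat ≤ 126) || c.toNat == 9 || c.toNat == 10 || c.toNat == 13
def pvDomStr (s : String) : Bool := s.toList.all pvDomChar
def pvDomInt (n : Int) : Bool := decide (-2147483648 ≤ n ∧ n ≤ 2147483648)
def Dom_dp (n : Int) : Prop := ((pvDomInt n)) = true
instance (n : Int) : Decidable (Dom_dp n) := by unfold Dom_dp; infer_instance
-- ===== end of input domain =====

-- B replaces A's n-row DP table with binary exponentiation of the fixed 10x10 digit-adjacency
-- matrix applied to the initial vector (O(log n) matrix multiplications; measured faster).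
-- ===== PORT A =====
-- body of A's inner loop: dp[i][j] = …
def dpInner (t : List (List Int)) (i j : Int) : List (List Int) :=
  let prev := PySem.List.pyGetD t (i - 1) []
  let v : Int :=
    if j = 0 then PySem.List.pyGetD prev 1 0
    else if j = 9 then PySem.List.pyGetD prev 8 0
    else PySem.List.pyGetD prev (j - 1) 0 + PySem.List.pyGetD prev (j + 1) 0
  PySem.List.pySetD t i (PySem.List.pySetD (PySem.List.pyGetD t i []) j v)

def dp (n : Int) : List Int :=
  let t : List (List Int) := (PySem.List.pyRange 0 (n + 1) 1).map (fun _ => List.replicate 10 (0 : Int))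
  let t := (PySem.List.pyRange 1 10 1).foldl
    (fun t i => PySem.List.pySetD t 1 (PySem.List.pySetD (PySem.List.pyGetD t 1 []) i 1)) t
  let t := (PySem.List.pyRange 2 (n + 1) 1).foldl
    (fun t i => (PySem.List.pyRange 0 10 1).foldl (fun t j => dpInner t i j) t) t
  PySem.List.pyGetD t n []

-- ===== PORT B =====
-- M = [[1 if abs(i - j) == 1 else 0 for j in range(10)] for i in range(10)]
def altM : List (List Int) :=
  (PySem.List.pyRange 0 10 1).map (fun i =>
    (PySem.List.pyRange 0 10 1).map (fun j => if |i - j| = 1 then (1 : Int) else 0))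

-- mat_mul(A, B)
def matMulL (A B : List (List Int)) : List (List Int) :=
  (PySem.List.pyRange 0 10 1).map (fun i =>
    (PySem.List.pyRange 0 10 1).map (fun j =>
      (PySem.List.pyRange 0 10 1).foldl (fun acc k =>
        acc + PySem.List.pyGetD (PySem.List.pyGetD A i []) k 0 *
              PySem.List.pyGetD (PySem.List.pyGetD B k []) j 0) 0))

-- identity matrix returned by mat_pow(A, 0)
def idL : List (List Int) :=
  (PySem.List.pyRange 0 10 1).map (fun i =>
    (PySem.List.pyRange 0 10 1).map (fun j => if i = j then (1 : Int) else 0))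

-- mat_pow(A, e); Python recurses on e // 2 with e = n - 1 ≥ 0 under Pre_dp, so e is a Nat here
def matPowL (A : List (List Int)) (e : Nat) : List (List Int) :=
  if h : e = 0 then idL
  else
    let half := matPowL A (e / 2)
    let s := matMulL half half
    if e % 2 = 1 then matMulL s A else s
termination_by e
decreasing_by exact Nat.div_lt_self (Nat.pos_of_ne_zero h) (by omega)

-- vec_mul(v, P)
def vecMulL (v : List Int) (P : List (List Int)) : List Int :=
  (PySem.List.pyRange 0 10 1).map (fun j =>
    (PySem.List.pyRange 0 10 1).foldl (fun acc i =>
      acc + PySem.List.pyGetD v i 0 *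
            PySem.List.pyGetD (PySem.List.pyGetD P i []) j 0) 0)

def dp_alt (n : Int) : List Int :=
  let P := matPowL altM (n - 1).toNat
  vecMulL ((0 : Int) :: List.replicate 9 1) P

-- ===== PRECONDITION & SPEC =====
-- A indexes dp[1] into a table of n+1 rows, so it raises IndexError for every n ≤ 0.
def Pre_dp (n : Int) : Prop := 1 ≤ n
instance (n : Int) : Decidable (Pre_dp n) := by unfold Pre_dp; infer_instance
def pvWitness_dp : Int := 3

def Spec_dp (n : Int) (out : List Int) : Prop := out = dp_alt n
instance (n : Int) (out : List Int) : Decidable (Spec_dp n out) := by unfold Spec_dp; infer_instance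

-- ===== CLAIM (what is proved, stated in full; the proofs are below) =====
def Claim_equal_dp : Prop := ∀ (n : Int), Dom_dp n → Pre_dp n → Spec_dp n (dp n)

-- ===== LEMMAS AND PROOFS =====

-- the one-step linear map A's row update realises (proof-only helper)
def pvStep (row : List Int) : List Int :=
  PySem.List.pyGetD row 1 0 ::
    ((PySem.List.pyRange 1 9 1).map
        (fun j => PySem.List.pyGetD row (j - 1) 0 + PySem.List.pyGetD row (j + 1) 0)
      ++ [PySem.List.pyGetD row 8 0])

-- the value A writes into cell j (reads only the previous row)
def pvVal (j : Nat) (prev : List Int) : Int :=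
  if j = 0 then PySem.List.pyGetD prev 1 0
  else if j = 9 then PySem.List.pyGetD prev 8 0
  else PySem.List.pyGetD prev ((j : Int) - 1) 0 + PySem.List.pyGetD prev ((j : Int) + 1) 0

theorem pv_getD_set_self (t : List (List Int)) (i : Nat) (r : List Int) (h : i < t.length) :
    (t.set i r).getD i [] = r := by
  simp [List.getD, h]

theorem pv_getD_set_ne (t : List (List Int)) (i j : Nat) (r : List Int) (h : j ≠ i) :
    (t.set j r).getD i [] = t.getD i [] := by
  simp [List.getD, List.getElem?_set_ne h]

theorem pv_set10 (r : List Int) (h : r.length = 10) (v0 v1 v2 v3 v4 v5 v6 v7 v8 v9 : Int) :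
    (((((((((r.set 0 v0).set 1 v1).set 2 v2).set 3 v3).set 4 v4).set 5 v5).set 6 v6).set 7 v7).set 8 v8).set 9 v9
      = [v0,v1,v2,v3,v4,v5,v6,v7,v8,v9] := by
  apply List.ext_getElem (by simp [h])
  intro i h1 h2
  simp only [List.length_set, h] at h1
  interval_cases i <;> simp

theorem dpInner_eval (t : List (List Int)) (a : Nat) (ha : 2 ≤ a) (j : Nat) (hj : j < 10) :
    dpInner t (a : Int) (j : Int) = t.set a ((t.getD a []).set j (pvVal j (t.getD (a - 1) []))) := by
  unfold dpInner pvVal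
  have h1 : ((a : Int) - 1) = ((a - 1 : Nat) : Int) := by omega
  rw [h1]
  simp only [PySem.List.pyGetD_natCast, PySem.List.pySetD_natCast]
  by_cases hj0 : j = 0
  · subst hj0; simp
  by_cases hj9 : j = 9
  · subst hj9; norm_num
  · have e9 : ¬ ((j : Int) = 9) := by omega
    simp [hj0, hj9, e9]

theorem pv_inner_loop (t : List (List Int)) (a : Nat) (h2 : 2 ≤ a) (hlt : a < t.length)
    (hrow : (t.getD a []).length = 10) :
    (PySem.List.pyRange 0 10 1).foldl (fun t j => dpInner t (a : Int) j) t
      = t.set a (pvStep (t.getD (a - 1) [])) := by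
  have hne : a ≠ a - 1 := by omega
  rw [show PySem.List.pyRange 0 10 1
      = [((0:Nat):Int),((1:Nat):Int),((2:Nat):Int),((3:Nat):Int),((4:Nat):Int),
         ((5:Nat):Int),((6:Nat):Int),((7:Nat):Int),((8:Nat):Int),((9:Nat):Int)] from by decide]
  simp only [List.foldl_cons, List.foldl_nil]
  rw [dpInner_eval t a h2 0 (by norm_num)]
  rw [dpInner_eval _ a h2 1 (by norm_num), pv_getD_set_ne _ _ _ _ hne, pv_getD_set_self _ _ _ hlt, List.set_set]
  rw [dpInner_eval _ a h2 2 (by norm_num), pv_getD_set_ne _ _ _ _ hne, pv_getD_set_self _ _ _ hlt, List.set_set]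
  rw [dpInner_eval _ a h2 3 (by norm_num), pv_getD_set_ne _ _ _ _ hne, pv_getD_set_self _ _ _ hlt, List.set_set]
  rw [dpInner_eval _ a h2 4 (by norm_num), pv_getD_set_ne _ _ _ _ hne, pv_getD_set_self _ _ _ hlt, List.set_set]
  rw [dpInner_eval _ a h2 5 (by norm_num), pv_getD_set_ne _ _ _ _ hne, pv_getD_set_self _ _ _ hlt, List.set_set]
  rw [dpInner_eval _ a h2 6 (by norm_num), pv_getD_set_ne _ _ _ _ hne, pv_getD_set_self _ _ _ hlt, List.set_set]
  rw [dpInner_eval _ a h2 7 (by norm_num), pv_getD_set_ne _ _ _ _ hne, pv_getD_set_self _ _ _ hlt, List.set_set]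
  rw [dpInner_eval _ a h2 8 (by norm_num), pv_getD_set_ne _ _ _ _ hne, pv_getD_set_self _ _ _ hlt, List.set_set]
  rw [dpInner_eval _ a h2 9 (by norm_num), pv_getD_set_ne _ _ _ _ hne, pv_getD_set_self _ _ _ hlt, List.set_set]
  rw [pv_set10 _ hrow]
  simp [pvStep, pvVal, show PySem.List.pyRange 1 9 1 = [1,2,3,4,5,6,7,8] from by decide]

theorem pv_init_step (t : List (List Int)) (i : Nat) :
    PySem.List.pySetD t 1 (PySem.List.pySetD (PySem.List.pyGetD t 1 []) ((i : Nat) : Int) 1)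
      = t.set 1 ((t.getD 1 []).set i 1) := by
  rw [show (1 : Int) = ((1 : Nat) : Int) from rfl]
  simp only [PySem.List.pySetD_natCast, PySem.List.pyGetD_natCast]

theorem pv_init_loop (t : List (List Int)) (h1 : 1 < t.length)
    (h : t.getD 1 [] = List.replicate 10 0) :
    (PySem.List.pyRange 1 10 1).foldl
        (fun t i => PySem.List.pySetD t 1 (PySem.List.pySetD (PySem.List.pyGetD t 1 []) i 1)) t
      = t.set 1 ((0 : Int) :: List.replicate 9 1) := by
  rw [show PySem.List.pyRange 1 10 1
      = [((1:Nat):Int),((2:Nat):Int),((3:Nat):Int),((4:Nat):Int),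
         ((5:Nat):Int),((6:Nat):Int),((7:Nat):Int),((8:Nat):Int),((9:Nat):Int)] from by decide]
  simp only [List.foldl_cons, List.foldl_nil]
  rw [pv_init_step t 1]
  rw [pv_init_step _ 2, pv_getD_set_self _ _ _ h1, List.set_set]
  rw [pv_init_step _ 3, pv_getD_set_self _ _ _ h1, List.set_set]
  rw [pv_init_step _ 4, pv_getD_set_self _ _ _ h1, List.set_set]
  rw [pv_init_step _ 5, pv_getD_set_self _ _ _ h1, List.set_set]
  rw [pv_init_step _ 6, pv_getD_set_self _ _ _ h1, List.set_set]
  rw [pv_init_step _ 7, pv_getD_set_self _ _ _ h1, List.set_set]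
  rw [pv_init_step _ 8, pv_getD_set_self _ _ _ h1, List.set_set]
  rw [pv_init_step _ 9, pv_getD_set_self _ _ _ h1, List.set_set]
  rw [h]
  congr 1

theorem pv_outer_loop (k : Nat) : ∀ (a : Nat) (t : List (List Int)), 2 ≤ a →
    a + k ≤ t.length →
    (∀ j, a ≤ j → j < t.length → (t.getD j []).length = 10) →
    PySem.List.pyGetD
        ((PySem.List.pyRange (a : Int) ((a + k : Nat) : Int) 1).foldl
          (fun t i => (PySem.List.pyRange 0 10 1).foldl (fun t j => dpInner t i j) t) t)
        ((a + k - 1 : Nat) : Int) []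
      = pvStep^[k] (t.getD (a - 1) []) := by
  induction k with
  | zero =>
    intro a t h2 hlen hrows
    rw [show PySem.List.pyRange (a : Int) ((a + 0 : Nat) : Int) 1 = [] from
      PySem.List.pyRange_one_eq_nil (by omega)]
    simp
  | succ k ih =>
    intro a t h2 hlen hrows
    rw [PySem.List.pyRange_one_cons (by omega : (a : Int) < ((a + (k+1) : Nat) : Int))]
    rw [List.foldl_cons]
    rw [pv_inner_loop t a h2 (by omega) (hrows a (by omega) (by omega))]
    have hcast : ((a : Int) + 1) = (((a + 1 : Nat)) : Int) := by omega
    have hc2 : ((a + (k+1) : Nat) : Int) = (((a + 1) + k : Nat) : Int) := by omega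
    rw [hcast, hc2, show a + (k + 1) - 1 = a + 1 + k - 1 from by omega]
    rw [ih (a + 1) _ (by omega) (by simp; omega)
      (by
        intro j hj1 hj2
        rw [List.length_set] at hj2
        rw [pv_getD_set_ne _ _ _ _ (by omega : a ≠ j)]
        exact hrows j (by omega) (by omega))]
    rw [show a + 1 - 1 = a from by omega, pv_getD_set_self _ _ _ (by omega),
      Function.iterate_succ_apply]

-- A's result is the k-fold iterate of the linear step on the initial vector
theorem pv_dp_eq_iterate (m : Nat) (hm : 1 ≤ m) :
    dp (m : Int) = pvStep^[m - 1] ((0 : Int) :: List.replicate 9 1) := by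
  simp only [dp]
  rw [show ((m : Int) + 1) = ((m + 1 : Nat) : Int) from by omega]
  rw [show (PySem.List.pyRange 0 ((m + 1 : Nat) : Int) 1).map (fun _ => List.replicate 10 (0 : Int))
      = List.replicate (m + 1) (List.replicate 10 0) from by
    rw [List.map_const']
    congr 1
    rw [PySem.List.length_pyRange_one]
    omega]
  rw [pv_init_loop _ (by simp; omega) (by
    rw [List.getD_eq_getElem?_getD]
    simp [show (1 : Nat) < m + 1 from by omega])]
  rw [show (2 : Int) = ((2 : Nat) : Int) from rfl]
  rw [show ((m + 1 : Nat) : Int) = ((2 + (m - 1) : Nat) : Int) from by omega]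
  rw [show ((m : Int)) = ((2 + (m - 1) - 1 : Nat) : Int) from by omega]
  rw [pv_outer_loop (m - 1) 2 _ (by omega) (by simp; omega)
    (by
      intro j hj1 hj2
      rw [List.length_set, List.length_replicate] at hj2
      rw [pv_getD_set_ne _ _ _ _ (by omega : 1 ≠ j)]
      rw [List.getD_eq_getElem?_getD]
      simp [hj2])]
  rw [show (2 : Nat) - 1 = 1 from rfl, pv_getD_set_self _ _ _ (by simp; omega)]

-- ===== the matrix bridge =====

def toM (L : List (List Int)) : Matrix (Fin 10) (Fin 10) ℤ :=
  fun i j => (L.getD i.val []).getD j.val 0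

def toRow (v : List Int) : Fin 10 → ℤ := fun j => v.getD j.val 0

theorem pv_R10 : PySem.List.pyRange 0 10 1 = [0,1,2,3,4,5,6,7,8,9] := by decide

theorem pv_getD_map_R10 {α : Type} (f : Int → α) (d : α) (i : Fin 10) :
    (([0,1,2,3,4,5,6,7,8,9] : List Int).map f).getD i.val d = f ((i.val : Int)) := by
  fin_cases i <;> rfl

set_option maxHeartbeats 1000000 in
theorem pv_matMulL_entry (A B : List (List Int)) (i j : Fin 10) :
    toM (matMulL A B) i j = ∑ k : Fin 10, toM A i k * toM B k j := by
  unfold toM matMulL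
  rw [pv_R10, pv_getD_map_R10, pv_getD_map_R10]
  simp only [List.foldl_cons, List.foldl_nil, Fin.sum_univ_succ,
    Fin.val_zero, Fin.val_succ]
  simp [pysem]
  ring

theorem pv_toM_matMulL (A B : List (List Int)) : toM (matMulL A B) = toM A * toM B := by
  funext i j
  rw [Matrix.mul_apply]
  exact pv_matMulL_entry A B i j

theorem pv_toM_idL : toM idL = 1 := by
  funext i j
  rw [Matrix.one_apply]
  revert i j
  decide

theorem pv_toM_matPowL (A : List (List Int)) (e : Nat) :
    toM (matPowL A e) = toM A ^ e := by
  induction e using Nat.strong_induction_on with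
  | _ e ih =>
    rw [matPowL]
    by_cases h0 : e = 0
    · simp [h0, pv_toM_idL]
    · have hlt : e / 2 < e := Nat.div_lt_self (Nat.pos_of_ne_zero h0) (by omega)
      have hh := ih (e / 2) hlt
      simp only [h0, dif_neg, not_false_iff]
      by_cases hodd : e % 2 = 1
      · simp only [hodd, if_pos]
        rw [pv_toM_matMulL, pv_toM_matMulL, hh, ← pow_add, ← pow_succ]
        congr 1
        omega
      · simp only [hodd, if_neg, not_false_iff]
        rw [pv_toM_matMulL, hh, ← pow_add]
        congr 1
        omega

set_option maxHeartbeats 1000000 in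
theorem pv_toRow_vecMulL (v : List Int) (P : List (List Int)) :
    toRow (vecMulL v P) = Matrix.vecMul (toRow v) (toM P) := by
  funext j
  unfold toRow vecMulL
  rw [pv_R10, pv_getD_map_R10]
  simp only [Matrix.vecMul, dotProduct, Fin.sum_univ_succ,
    Fin.val_zero, Fin.val_succ, List.foldl_cons, List.foldl_nil]
  unfold toM
  simp [pysem]
  ring

-- one DP step is vector–matrix multiplication by altM
set_option maxHeartbeats 2000000 in
theorem pv_step_toRow (v : List Int) :
    toRow (pvStep v) = Matrix.vecMul (toRow v) (toM altM) := by
  have hM : toM altM = fun i j => if i.val + 1 = j.val ∨ j.val + 1 = i.val then (1:ℤ) else 0 := by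
    funext i j; revert i j; decide
  funext j
  rw [hM]
  simp only [Matrix.vecMul, dotProduct, Fin.sum_univ_succ, Fin.val_zero, Fin.val_succ]
  unfold pvStep toRow
  rw [show PySem.List.pyRange 1 9 1 = [1,2,3,4,5,6,7,8] from by decide]
  simp only [List.map]
  fin_cases j <;> norm_num [pysem]

theorem pv_toRow_iterate (k : Nat) (v : List Int) :
    toRow (pvStep^[k] v) = Matrix.vecMul (toRow v) (toM altM ^ k) := by
  induction k with
  | zero => simp [Matrix.vecMul_one]
  | succ k ih =>
    rw [Function.iterate_succ_apply', pv_step_toRow, ih, Matrix.vecMul_vecMul, ← pow_succ]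

theorem pv_len_pvStep (v : List Int) : (pvStep v).length = 10 := by
  simp [pvStep, show PySem.List.pyRange 1 9 1 = [1,2,3,4,5,6,7,8] from by decide]

theorem pv_len_iterate (k : Nat) : (pvStep^[k] ((0 : Int) :: List.replicate 9 1)).length = 10 := by
  cases k with
  | zero => rfl
  | succ k => rw [Function.iterate_succ_apply']; exact pv_len_pvStep _

theorem pv_len_vecMulL (v : List Int) (P : List (List Int)) : (vecMulL v P).length = 10 := by
  simp [vecMulL, pv_R10]

-- ===== VERDICT (by name: the statement is the Claim_ definition above) =====
theorem dp_spec : Claim_equal_dp := by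
  intro n _ hpre
  unfold Spec_dp
  unfold Pre_dp at hpre
  obtain ⟨m, hm, rfl⟩ : ∃ m : Nat, 1 ≤ m ∧ n = (m : Int) := ⟨n.toNat, by omega, by omega⟩
  rw [pv_dp_eq_iterate m hm]
  have hlenA : (pvStep^[m - 1] ((0 : Int) :: List.replicate 9 1)).length = 10 := pv_len_iterate _
  have hrow : toRow (pvStep^[m - 1] ((0 : Int) :: List.replicate 9 1)) = toRow (dp_alt (m : Int)) := by
    show _ = toRow (vecMulL ((0 : Int) :: List.replicate 9 1) (matPowL altM ((m : Int) - 1).toNat))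
    rw [pv_toRow_vecMulL, pv_toM_matPowL,
      show ((m : Int) - 1).toNat = m - 1 from by omega, pv_toRow_iterate]
  have hlenB : (dp_alt (m : Int)).length = 10 := pv_len_vecMulL _ _
  apply List.ext_getElem (by rw [hlenA, hlenB])
  intro i hi _
  rw [hlenA] at hi
  have := congrFun hrow ⟨i, hi⟩
  unfold toRow at this
  rwa [List.getD_eq_getElem _ _ (by rw [hlenA]; exact hi),
       List.getD_eq_getElem _ _ (by rw [hlenB]; exact hi)] at this
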